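-- pv_equiv track=rewrite | github.com/DShaulov/LeetCode | 1770.MaximumScore.py | maximumScore
-- ===== SOURCE A (Python) =====
-- from typing import List
--
-- def maximumScore(nums: List[int], multipliers: List[int]) -> int:
--     score = 0
--     positiveNums = [x for x in nums if x > 0]
--     positiveMults = [x for x in multipliers if x > 0]
--     negativeNums = [abs(x) for x in nums if x < 0]
--     negativeMults = [abs(x) for x in multipliers if x < 0]
--
--
--     while (positiveNums != [] and positiveMults != [] and negativeNums !=[] and negativeMults != []):
--         # Find the largest
--         largestPosNum = 0
--         largestPosMult = 0
--         largestNegNum = 0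
--         largestNegMult = 0
--
--         for number in positiveNums:
--             if number > largestPosNum:
--                 largestPosNum = number
--         for number in negativeNums:
--             if number > largestNegNum:
--                 largestNegNum = number
--
--         for mult in positiveMults:
--             if mult > largestPosMult:
--                 largestPosMult = mult
--         for mult in negativeMults:
--             if mult > largestNegMult:
--                 largestNegMult = mult
--
--         if (largestNegMult * largestNegNum < largestPosNum * largestPosMult):
--             score += largestPosNum * largestPosMult
--             positiveNums.remove(largestPosNum)
--             positiveMults.remove(largestPosMult)
--         else:
--             score += largestNegNum * largestNegMult
--             negativeNums.remove(largestNegNum)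
--             negativeMults.remove(largestNegMult)
--     if (negativeNums == [] or negativeMults == []):
--         while (positiveMults != [] and positiveNums != []):
--             largestNum = 0
--             largestMult = 0
--
--             for number in positiveNums:
--                 if number > largestNum:
--                     largestNum = number
--             for mult in positiveMults:
--                 if mult > largestMult:
--                     largestMult = mult
--
--             score += largestMult * largestNum
--             positiveMults.remove(largestMult)
--             positiveNums.remove(largestNum)
--     else:
--         while (negativeMults != [] and negativeNums != 0):
--             largestNum = 0
--             largestMult = 0
--
--             for number in negativeNums:
--                 if number > largestNum:
--                     largestNum = number
--             for mult in negativeMults: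
--                 if mult > largestMult:
--                     largestMult = mult
--
--             score += largestMult * largestNum
--             negativeMults.remove(largestMult)
--             negativeNums.remove(largestNum)
--     return score
-- ===== SOURCE B (Python) =====
-- from typing import List
--
-- def maximumScore(nums: List[int], multipliers: List[int]) -> int:
--     pn = sorted((x for x in nums if x > 0), reverse=True)
--     pm = sorted((x for x in multipliers if x > 0), reverse=True)
--     nn = sorted((-x for x in nums if x < 0), reverse=True)
--     nm = sorted((-x for x in multipliers if x < 0), reverse=True)
--     return sum(a * b for a, b in zip(pn, pm)) + sum(a * b for a, b in zip(nn, nm))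
-- ===== Notes on version B (the rewrite author's own statement) =====
-- stated objective: faster
-- what changed: Replaces A's repeated linear max-scans and list.remove calls over four shrinking lists with one descending sort per group followed by a single zip-and-sum pass.
-- outside the precondition, e.g. on maximumScore([-5, 1], [-5, -1, 1]): A returns 26, B returns 26
import Mathlib
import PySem

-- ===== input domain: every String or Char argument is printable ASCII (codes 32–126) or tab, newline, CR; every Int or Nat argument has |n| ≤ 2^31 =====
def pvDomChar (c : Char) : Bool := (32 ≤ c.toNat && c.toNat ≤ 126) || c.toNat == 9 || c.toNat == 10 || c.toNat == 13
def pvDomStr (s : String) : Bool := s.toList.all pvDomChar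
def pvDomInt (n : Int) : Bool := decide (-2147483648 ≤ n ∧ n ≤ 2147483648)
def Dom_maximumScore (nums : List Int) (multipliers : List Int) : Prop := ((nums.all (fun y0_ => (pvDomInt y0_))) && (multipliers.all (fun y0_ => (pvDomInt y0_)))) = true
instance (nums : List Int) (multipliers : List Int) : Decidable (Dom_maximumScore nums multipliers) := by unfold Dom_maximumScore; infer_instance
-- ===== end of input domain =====

-- B replaces A's quadratic repeated max-scan-and-remove greedy by sorting each sign
-- group descending once and summing the products of the zipped pairs (objective: faster).

-- ===== PORT A =====

-- 'largest = 0; for x in l: if x > largest: largest = x'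
def pvLargest (l : List Int) : Int := l.foldl (fun largest x => if x > largest then x else largest) 0

-- termination helper for the loops below (a successful list.remove shortens the list)
theorem pvRemoveLen {xs ys : List Int} {v : Int} (h : PySem.List.remove? xs v = some ys) :
    ys.length < xs.length := by
  have hv : v ∈ xs := by
    by_contra hc
    rw [(PySem.List.remove?_eq_none_iff xs v).mpr hc] at h
    simp at h
  rw [PySem.List.remove?_eq_some_erase xs v hv] at h
  cases h
  rw [List.length_erase]
  simp [hv]
  exact List.length_pos_of_mem hv

-- A's first while loop; the '_ , _' fallthroughs are where Python's list.remove would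
-- raise ValueError (never reached from maximumScore's call: the removed value is a member)
def pvMainLoop (pn pm ngn ngm : List Int) (score : Int) :
    List Int × List Int × List Int × List Int × Int :=
  if pn ≠ [] ∧ pm ≠ [] ∧ ngn ≠ [] ∧ ngm ≠ [] then
    if pvLargest ngm * pvLargest ngn < pvLargest pn * pvLargest pm then
      match h1 : PySem.List.remove? pn (pvLargest pn), h2 : PySem.List.remove? pm (pvLargest pm) with
      | some pn', some pm' => pvMainLoop pn' pm' ngn ngm (score + pvLargest pn * pvLargest pm)
      | _, _ => (pn, pm, ngn, ngm, score)
    else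
      match h1 : PySem.List.remove? ngn (pvLargest ngn), h2 : PySem.List.remove? ngm (pvLargest ngm) with
      | some ngn', some ngm' => pvMainLoop pn pm ngn' ngm' (score + pvLargest ngn * pvLargest ngm)
      | _, _ => (pn, pm, ngn, ngm, score)
  else (pn, pm, ngn, ngm, score)
termination_by pn.length + ngn.length
decreasing_by
  · have := pvRemoveLen h1; omega
  · have := pvRemoveLen h1; omega

-- A's positive tail loop
def pvPosTail (pn pm : List Int) (score : Int) : Int :=
  if pm ≠ [] ∧ pn ≠ [] then
    match h1 : PySem.List.remove? pm (pvLargest pm), h2 : PySem.List.remove? pn (pvLargest pn) with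
    | some pm', some pn' => pvPosTail pn' pm' (score + pvLargest pm * pvLargest pn)
    | _, _ => score
  else score
termination_by pm.length
decreasing_by have := pvRemoveLen h1; omega

-- A's negative tail loop; the guard 'negativeNums != 0' is always true in Python, so
-- only 'negativeMults != []' is tested; the '_ , _' fallthrough is Python's ValueError
def pvNegTail (ngn ngm : List Int) (score : Int) : Int :=
  if ngm ≠ [] then
    match h1 : PySem.List.remove? ngm (pvLargest ngm), h2 : PySem.List.remove? ngn (pvLargest ngn) with
    | some ngm', some ngn' => pvNegTail ngn' ngm' (score + pvLargest ngm * pvLargest ngn)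
    | _, _ => score
  else score
termination_by ngm.length
decreasing_by have := pvRemoveLen h1; omega

def maximumScore (nums : List Int) (multipliers : List Int) : Int :=
  let positiveNums := nums.filter (fun x => x > 0)
  let positiveMults := multipliers.filter (fun x => x > 0)
  let negativeNums := (nums.filter (fun x => x < 0)).map (fun x => |x|)
  let negativeMults := (multipliers.filter (fun x => x < 0)).map (fun x => |x|)
  let r := pvMainLoop positiveNums positiveMults negativeNums negativeMults 0
  if r.2.2.1 = [] ∨ r.2.2.2.1 = [] then
    pvPosTail r.1 r.2.1 r.2.2.2.2
  else
    pvNegTail r.2.2.1 r.2.2.2.1 r.2.2.2.2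

-- ===== PORT B =====
def maximumScore_alt (nums : List Int) (multipliers : List Int) : Int :=
  let pn := PySem.List.sorted (nums.filter (fun x => x > 0)) (fun x => x) true
  let pm := PySem.List.sorted (multipliers.filter (fun x => x > 0)) (fun x => x) true
  let nn := PySem.List.sorted ((nums.filter (fun x => x < 0)).map (fun x => -x)) (fun x => x) true
  let nm := PySem.List.sorted ((multipliers.filter (fun x => x < 0)).map (fun x => -x)) (fun x => x) true
  ((pn.zip pm).map (fun p => p.1 * p.2)).sum + ((nn.zip nm).map (fun p => p.1 * p.2)).sum

-- ===== PRECONDITION & SPEC =====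
-- Pre_ excludes inputs with at least one but fewer negative nums than negative
-- multipliers, on which A's negative tail loop may call list.remove on an empty
-- list and raise ValueError.
def Pre_maximumScore (nums : List Int) (multipliers : List Int) : Prop :=
  ¬ (0 < (nums.filter (fun x => x < 0)).length ∧
     (nums.filter (fun x => x < 0)).length < (multipliers.filter (fun x => x < 0)).length)
instance (nums : List Int) (multipliers : List Int) : Decidable (Pre_maximumScore nums multipliers) := by
  unfold Pre_maximumScore; infer_instance

def pvWitness_maximumScore : List Int × List Int := ([2, -3, 5], [3, -1])

def Spec_maximumScore (nums : List Int) (multipliers : List Int) (out : Int) : Prop := out = maximumScore_alt nums multipliers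
instance (nums : List Int) (multipliers : List Int) (out : Int) : Decidable (Spec_maximumScore nums multipliers out) := by unfold Spec_maximumScore; infer_instance

-- ===== CLAIM (what is proved, stated in full; the proofs are below) =====
def Claim_equal_maximumScore : Prop := ∀ (nums : List Int) (multipliers : List Int), Dom_maximumScore nums multipliers → Pre_maximumScore nums multipliers → Spec_maximumScore nums multipliers (maximumScore nums multipliers)

-- ===== LEMMAS AND PROOFS =====

-- the quantity B computes on one sign group: zip the two descending sorts, sum products
def gScore (l m : List Int) : Int :=
  (((PySem.List.sorted l (fun x => x) true).zip (PySem.List.sorted m (fun x => x) true)).map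
    (fun p => p.1 * p.2)).sum

theorem gScore_nil_left (m : List Int) : gScore [] m = 0 := by
  simp [gScore, PySem.List.sorted]

theorem gScore_nil_right (l : List Int) : gScore l [] = 0 := by
  have h : PySem.List.sorted ([] : List Int) (fun x => x) true = [] := by
    simp [PySem.List.sorted]
  simp [gScore, h]

theorem pvFoldlMaxMem : ∀ (t : List Int) (a : Int), t.foldl max a = a ∨ t.foldl max a ∈ t := by
  intro t
  induction t with
  | nil => intro a; left; rfl
  | cons x t ih =>
    intro a
    rcases ih (max a x) with h | h
    · rcases max_choice a x with hm | hm
      · left; simpa [hm] using h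
      · right; rw [List.foldl_cons, h, hm]; simp
    · right; simp [List.foldl, h]

-- A's 'largest' scan computes a member that bounds the (positive) list from above
theorem pvLargest_spec (l : List Int) (hne : l ≠ []) (hpos : ∀ x ∈ l, 0 < x) :
    pvLargest l ∈ l ∧ ∀ x ∈ l, x ≤ pvLargest l := by
  have hstep : (fun (largest x : Int) => if x > largest then x else largest) = max := by
    funext a x
    by_cases h : x ≤ a
    · simp [max_eq_left h, not_lt_of_ge h]
    · have h' : a < x := by omega
      simp [h', max_eq_right (le_of_lt h')]
  have hL : pvLargest l = l.foldl max 0 := by rw [pvLargest, hstep]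
  have hmax := PySem.List.le_foldl_max l (0 : Int)
  constructor
  · rcases pvFoldlMaxMem l 0 with h | h
    · rcases l with _ | ⟨y, t⟩
      · exact absurd rfl hne
      · exfalso
        have h1 := hpos y (by simp)
        have h2 := hmax.2 y (by simp)
        rw [h] at h2
        omega
    · rwa [hL]
  · intro x hx; rw [hL]; exact hmax.2 x hx

-- descending sort decomposes by stripping off a maximum
theorem sorted_rev_eq_max_cons (l : List Int) (a : Int) (ha : a ∈ l) (hmax : ∀ x ∈ l, x ≤ a) :
    PySem.List.sorted l (fun x => x) true = a :: PySem.List.sorted (l.erase a) (fun x => x) true := by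
  apply PySem.List.eq_of_perm_of_pairwise_le_of_injective (fun x : Int => -x) neg_injective
  · exact ((PySem.List.sorted_perm l _ true).trans (List.perm_cons_erase ha)).trans
      (List.Perm.cons a ((PySem.List.sorted_perm (l.erase a) _ true).symm))
  · exact (PySem.List.sorted_pairwise_rev l (fun x => x)).imp (fun h => by omega)
  · rw [List.pairwise_cons]
    constructor
    · intro y hy
      have : y ∈ l := List.mem_of_mem_erase ((PySem.List.mem_sorted _ _ _ y).mp hy)
      have := hmax y this
      omega
    · exact (PySem.List.sorted_pairwise_rev (l.erase a) (fun x => x)).imp (fun h => by omega)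

theorem gScore_step (l m : List Int) (a b : Int) (hal : a ∈ l) (hbm : b ∈ m)
    (hla : ∀ x ∈ l, x ≤ a) (hmb : ∀ x ∈ m, x ≤ b) :
    gScore l m = a * b + gScore (l.erase a) (m.erase b) := by
  unfold gScore
  rw [sorted_rev_eq_max_cons l a hal hla, sorted_rev_eq_max_cons m b hbm hmb]
  simp

theorem erase_pos {l : List Int} (hpos : ∀ x ∈ l, 0 < x) (a : Int) :
    ∀ x ∈ l.erase a, 0 < x := fun x hx => hpos x (List.mem_of_mem_erase hx)

theorem pvPosTail_spec (pn pm : List Int) (s : Int) :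
    (∀ x ∈ pn, 0 < x) → (∀ x ∈ pm, 0 < x) → pvPosTail pn pm s = s + gScore pn pm := by
  induction pn, pm, s using pvPosTail.induct with
  | case1 pn pm s h pm' pn' h1 h2 ih =>
    intro hpn hpm
    obtain ⟨hpmne, hpnne⟩ := h
    obtain ⟨hnmem, hnmax⟩ := pvLargest_spec pn hpnne hpn
    obtain ⟨hmmem, hmmax⟩ := pvLargest_spec pm hpmne hpm
    have e1 : pm' = pm.erase (pvLargest pm) := by
      have hh := PySem.List.remove?_eq_some_erase pm (pvLargest pm) hmmem
      rw [hh] at h1; exact (Option.some_inj.mp h1).symm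
    have e2 : pn' = pn.erase (pvLargest pn) := by
      have hh := PySem.List.remove?_eq_some_erase pn (pvLargest pn) hnmem
      rw [hh] at h2; exact (Option.some_inj.mp h2).symm
    rw [pvPosTail, if_pos (And.intro hpmne hpnne)]
    split
    next pm2 pn2 g1 g2 =>
      have epm : pm2 = pm' := by rw [h1] at g1; exact (Option.some_inj.mp g1).symm
      have epn : pn2 = pn' := by rw [h2] at g2; exact (Option.some_inj.mp g2).symm
      rw [epm, epn, ih (e2 ▸ erase_pos hpn _) (e1 ▸ erase_pos hpm _)]
      rw [gScore_step pn pm (pvLargest pn) (pvLargest pm) hnmem hmmem hnmax hmmax, e1, e2]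
      ring
    next hno =>
      exact ((hno pm' pn' h1 h2).elim)
  | case2 pn pm s h hmatch =>
    intro hpn hpm
    obtain ⟨hpmne, hpnne⟩ := h
    obtain ⟨hnmem, _⟩ := pvLargest_spec pn hpnne hpn
    obtain ⟨hmmem, _⟩ := pvLargest_spec pm hpmne hpm
    exfalso
    have ha := PySem.List.remove?_eq_some_erase pm (pvLargest pm) hmmem
    have hb := PySem.List.remove?_eq_some_erase pn (pvLargest pn) hnmem
    exact hmatch _ _ ha hb
  | case3 pn pm s h =>
    intro hpn hpm
    rw [pvPosTail, if_neg h]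
    have : pm = [] ∨ pn = [] := by tauto
    rcases this with h' | h'
    · rw [h', gScore_nil_right]; ring
    · rw [h', gScore_nil_left]; ring

theorem pvNegTail_spec (ngn ngm : List Int) (s : Int) :
    (∀ x ∈ ngn, 0 < x) → (∀ x ∈ ngm, 0 < x) → ngm.length ≤ ngn.length →
    pvNegTail ngn ngm s = s + gScore ngn ngm := by
  induction ngn, ngm, s using pvNegTail.induct with
  | case1 ngn ngm s h ngm' ngn' h1 h2 ih =>
    intro hgn hgm hlen
    have hgmne : ngm ≠ [] := h
    have hgnne : ngn ≠ [] := by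
      have := List.length_pos_of_ne_nil hgmne
      exact List.ne_nil_of_length_pos (by omega)
    obtain ⟨hnmem, hnmax⟩ := pvLargest_spec ngn hgnne hgn
    obtain ⟨hmmem, hmmax⟩ := pvLargest_spec ngm hgmne hgm
    have e1 : ngm' = ngm.erase (pvLargest ngm) := by
      have hh := PySem.List.remove?_eq_some_erase ngm (pvLargest ngm) hmmem
      rw [hh] at h1; exact (Option.some_inj.mp h1).symm
    have e2 : ngn' = ngn.erase (pvLargest ngn) := by
      have hh := PySem.List.remove?_eq_some_erase ngn (pvLargest ngn) hnmem
      rw [hh] at h2; exact (Option.some_inj.mp h2).symm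
    have hlen' : ngm'.length ≤ ngn'.length := by
      rw [e1, e2, List.length_erase_of_mem hmmem, List.length_erase_of_mem hnmem]; omega
    rw [pvNegTail, if_pos h]
    split
    next m2 n2 g1 g2 =>
      have em : m2 = ngm' := by rw [h1] at g1; exact (Option.some_inj.mp g1).symm
      have en : n2 = ngn' := by rw [h2] at g2; exact (Option.some_inj.mp g2).symm
      rw [em, en, ih (e2 ▸ erase_pos hgn _) (e1 ▸ erase_pos hgm _) hlen']
      rw [gScore_step ngn ngm (pvLargest ngn) (pvLargest ngm) hnmem hmmem hnmax hmmax, e1, e2]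
      ring
    next hno => exact ((hno ngm' ngn' h1 h2).elim)
  | case2 ngn ngm s h hmatch =>
    intro hgn hgm hlen
    have hgmne : ngm ≠ [] := h
    have hgnne : ngn ≠ [] := by
      have := List.length_pos_of_ne_nil hgmne
      exact List.ne_nil_of_length_pos (by omega)
    obtain ⟨hnmem, _⟩ := pvLargest_spec ngn hgnne hgn
    obtain ⟨hmmem, _⟩ := pvLargest_spec ngm hgmne hgm
    exact (hmatch _ _ (PySem.List.remove?_eq_some_erase ngm _ hmmem)
      (PySem.List.remove?_eq_some_erase ngn _ hnmem)).elim
  | case3 ngn ngm s h =>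
    intro hgn hgm hlen
    have : ngm = [] := by tauto
    rw [pvNegTail, if_neg h, this, gScore_nil_right]; ring

-- the main-loop invariant: positivity is preserved, the loop stops with one list empty,
-- equally many negatives were taken from both negative lists, and the score plus the
-- pair-sums of the leftovers equals the pair-sums of the inputs
theorem pvMainLoop_spec (pn pm ngn ngm : List Int) (s : Int) :
    (∀ x ∈ pn, 0 < x) → (∀ x ∈ pm, 0 < x) → (∀ x ∈ ngn, 0 < x) → (∀ x ∈ ngm, 0 < x) →
    (∀ x ∈ (pvMainLoop pn pm ngn ngm s).1, 0 < x) ∧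
    (∀ x ∈ (pvMainLoop pn pm ngn ngm s).2.1, 0 < x) ∧
    (∀ x ∈ (pvMainLoop pn pm ngn ngm s).2.2.1, 0 < x) ∧
    (∀ x ∈ (pvMainLoop pn pm ngn ngm s).2.2.2.1, 0 < x) ∧
    ((pvMainLoop pn pm ngn ngm s).1 = [] ∨ (pvMainLoop pn pm ngn ngm s).2.1 = [] ∨
     (pvMainLoop pn pm ngn ngm s).2.2.1 = [] ∨ (pvMainLoop pn pm ngn ngm s).2.2.2.1 = []) ∧
    (pvMainLoop pn pm ngn ngm s).2.2.1.length + ngm.length =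
      (pvMainLoop pn pm ngn ngm s).2.2.2.1.length + ngn.length ∧
    (pvMainLoop pn pm ngn ngm s).2.2.1.length ≤ ngn.length ∧
    (pvMainLoop pn pm ngn ngm s).2.2.2.2 +
        gScore (pvMainLoop pn pm ngn ngm s).1 (pvMainLoop pn pm ngn ngm s).2.1 +
        gScore (pvMainLoop pn pm ngn ngm s).2.2.1 (pvMainLoop pn pm ngn ngm s).2.2.2.1 =
      s + gScore pn pm + gScore ngn ngm := by
  induction pn, pm, ngn, ngm, s using pvMainLoop.induct with
  | case1 pn pm ngn ngm s h hcond pn' pm' h1 h2 ih =>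
    intro hpn hpm hnn hnm
    obtain ⟨hpnne, hpmne, hnnne, hnmne⟩ := h
    obtain ⟨hpmem, hpmax⟩ := pvLargest_spec pn hpnne hpn
    obtain ⟨hmmem, hmmax⟩ := pvLargest_spec pm hpmne hpm
    have e1 : pn' = pn.erase (pvLargest pn) := by
      have hh := PySem.List.remove?_eq_some_erase pn (pvLargest pn) hpmem
      rw [hh] at h1; exact (Option.some_inj.mp h1).symm
    have e2 : pm' = pm.erase (pvLargest pm) := by
      have hh := PySem.List.remove?_eq_some_erase pm (pvLargest pm) hmmem
      rw [hh] at h2; exact (Option.some_inj.mp h2).symm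
    rw [pvMainLoop, if_pos (⟨hpnne, hpmne, hnnne, hnmne⟩ :
      pn ≠ [] ∧ pm ≠ [] ∧ ngn ≠ [] ∧ ngm ≠ [])]
    rw [if_pos hcond]
    split
    next a b g1 g2 =>
      have ea : a = pn' := by rw [h1] at g1; exact (Option.some_inj.mp g1).symm
      have eb : b = pm' := by rw [h2] at g2; exact (Option.some_inj.mp g2).symm
      subst ea eb
      obtain ⟨i1, i2, i3, i4, i5, i6, i7, i8⟩ :=
        ih (e1 ▸ erase_pos hpn _) (e2 ▸ erase_pos hpm _) hnn hnm
      refine ⟨i1, i2, i3, i4, i5, i6, i7, ?_⟩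
      rw [gScore_step pn pm (pvLargest pn) (pvLargest pm) hpmem hmmem hpmax hmmax, ← e1, ← e2]
      linarith
    next hno => exact (hno pn' pm' h1 h2).elim
  | case2 pn pm ngn ngm s h hcond hmatch =>
    intro hpn hpm hnn hnm
    obtain ⟨hpnne, hpmne, hnnne, hnmne⟩ := h
    obtain ⟨hpmem, _⟩ := pvLargest_spec pn hpnne hpn
    obtain ⟨hmmem, _⟩ := pvLargest_spec pm hpmne hpm
    exact (hmatch _ _ (PySem.List.remove?_eq_some_erase pn _ hpmem)
      (PySem.List.remove?_eq_some_erase pm _ hmmem)).elim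
  | case3 pn pm ngn ngm s h hcond ngn' ngm' h1 h2 ih =>
    intro hpn hpm hnn hnm
    obtain ⟨hpnne, hpmne, hnnne, hnmne⟩ := h
    obtain ⟨hnmem, hnmax⟩ := pvLargest_spec ngn hnnne hnn
    obtain ⟨hmmem, hmmax⟩ := pvLargest_spec ngm hnmne hnm
    have e1 : ngn' = ngn.erase (pvLargest ngn) := by
      have hh := PySem.List.remove?_eq_some_erase ngn (pvLargest ngn) hnmem
      rw [hh] at h1; exact (Option.some_inj.mp h1).symm
    have e2 : ngm' = ngm.erase (pvLargest ngm) := by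
      have hh := PySem.List.remove?_eq_some_erase ngm (pvLargest ngm) hmmem
      rw [hh] at h2; exact (Option.some_inj.mp h2).symm
    have hl1 : ngn'.length + 1 = ngn.length := by
      rw [e1, List.length_erase_of_mem hnmem]
      have := List.length_pos_of_ne_nil hnnne; omega
    have hl2 : ngm'.length + 1 = ngm.length := by
      rw [e2, List.length_erase_of_mem hmmem]
      have := List.length_pos_of_ne_nil hnmne; omega
    rw [pvMainLoop, if_pos (⟨hpnne, hpmne, hnnne, hnmne⟩ :
      pn ≠ [] ∧ pm ≠ [] ∧ ngn ≠ [] ∧ ngm ≠ [])]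
    rw [if_neg hcond]
    split
    next a b g1 g2 =>
      have ea : a = ngn' := by rw [h1] at g1; exact (Option.some_inj.mp g1).symm
      have eb : b = ngm' := by rw [h2] at g2; exact (Option.some_inj.mp g2).symm
      subst ea eb
      obtain ⟨i1, i2, i3, i4, i5, i6, i7, i8⟩ :=
        ih hpn hpm (e1 ▸ erase_pos hnn _) (e2 ▸ erase_pos hnm _)
      refine ⟨i1, i2, i3, i4, i5, by omega, by omega, ?_⟩
      rw [gScore_step ngn ngm (pvLargest ngn) (pvLargest ngm) hnmem hmmem hnmax hmmax, ← e1, ← e2]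
      linarith
    next hno => exact (hno ngn' ngm' h1 h2).elim
  | case4 pn pm ngn ngm s h hcond hmatch =>
    intro hpn hpm hnn hnm
    obtain ⟨hpnne, hpmne, hnnne, hnmne⟩ := h
    obtain ⟨hnmem, _⟩ := pvLargest_spec ngn hnnne hnn
    obtain ⟨hmmem, _⟩ := pvLargest_spec ngm hnmne hnm
    exact (hmatch _ _ (PySem.List.remove?_eq_some_erase ngn _ hnmem)
      (PySem.List.remove?_eq_some_erase ngm _ hmmem)).elim
  | case5 pn pm ngn ngm s h =>
    intro hpn hpm hnn hnm
    rw [pvMainLoop, if_neg h]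
    refine ⟨hpn, hpm, hnn, hnm, by tauto, ?_, ?_, by ring⟩ <;> simp <;> omega

theorem filter_pos_pos (l : List Int) : ∀ x ∈ l.filter (fun x => x > 0), 0 < x := by
  intro x hx
  simpa using (List.mem_filter.mp hx).2

theorem map_neg_filter_pos (l : List Int) :
    ∀ x ∈ (l.filter (fun x => x < 0)).map (fun x => -x), 0 < x := by
  intro x hx
  obtain ⟨y, hy, rfl⟩ := List.mem_map.mp hx
  have : y < 0 := by simpa using (List.mem_filter.mp hy).2
  omega

-- A takes abs(x) of the negatives, B negates them: the same list
theorem abs_map_eq_neg_map (l : List Int) :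
    (l.filter (fun x => x < 0)).map (fun x => |x|) = (l.filter (fun x => x < 0)).map (fun x => -x) := by
  apply List.map_congr_left
  intro x hx
  have : x < 0 := by simpa using (List.mem_filter.mp hx).2
  exact abs_of_neg this

theorem pvFinal (nums multipliers : List Int)
    (hpre : ¬ (0 < (nums.filter (fun x => x < 0)).length ∧
      (nums.filter (fun x => x < 0)).length < (multipliers.filter (fun x => x < 0)).length)) :
    maximumScore nums multipliers = maximumScore_alt nums multipliers := by
  have halt : maximumScore_alt nums multipliers =
      gScore (nums.filter (fun x => x > 0)) (multipliers.filter (fun x => x > 0)) +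
      gScore ((nums.filter (fun x => x < 0)).map (fun x => -x))
             ((multipliers.filter (fun x => x < 0)).map (fun x => -x)) := rfl
  simp only [maximumScore, abs_map_eq_neg_map, halt]
  set PP := nums.filter (fun x => x > 0) with hPP
  set MM := multipliers.filter (fun x => x > 0) with hMM
  set NN := (nums.filter (fun x => x < 0)).map (fun x => -x) with hNN
  set NM := (multipliers.filter (fun x => x < 0)).map (fun x => -x) with hNM
  set r := pvMainLoop PP MM NN NM 0 with hr
  obtain ⟨i1, i2, i3, i4, i5, i6, i7, i8⟩ :=
    pvMainLoop_spec PP MM NN NM 0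
      (filter_pos_pos nums) (filter_pos_pos multipliers)
      (map_neg_filter_pos nums) (map_neg_filter_pos multipliers)
  rw [← hr] at i1 i2 i3 i4 i5 i6 i7 i8
  split
  next hc =>
    have hz : gScore r.2.2.1 r.2.2.2.1 = 0 := by
      rcases hc with hc | hc
      · rw [hc, gScore_nil_left]
      · rw [hc, gScore_nil_right]
    rw [pvPosTail_spec _ _ _ i1 i2]
    rw [hz] at i8
    linarith
  next hc =>
    push_neg at hc
    obtain ⟨hc1, hc2⟩ := hc
    have hz : gScore r.1 r.2.1 = 0 := by
      rcases i5 with h | h | h | h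
      · rw [h, gScore_nil_left]
      · rw [h, gScore_nil_right]
      · exact absurd h hc1
      · exact absurd h hc2
    have hNlen : 0 < (nums.filter (fun x => x < 0)).length := by
      have := List.length_pos_of_ne_nil hc1
      have hl : NN.length = (nums.filter (fun x => x < 0)).length := by
        rw [hNN, List.length_map]
      omega
    have hle : (multipliers.filter (fun x => x < 0)).length ≤ (nums.filter (fun x => x < 0)).length := by
      by_contra hlt
      exact hpre ⟨hNlen, by omega⟩
    have hlen2 : r.2.2.2.1.length ≤ r.2.2.1.length := by
      have hl1 : NN.length = (nums.filter (fun x => x < 0)).length := by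
        rw [hNN, List.length_map]
      have hl2 : NM.length = (multipliers.filter (fun x => x < 0)).length := by
        rw [hNM, List.length_map]
      omega
    rw [pvNegTail_spec _ _ _ i3 i4 hlen2]
    rw [hz] at i8
    linarith

-- ===== VERDICT (by name: the statement is the Claim_ definition above) =====
theorem maximumScore_spec : Claim_equal_maximumScore := by
  intro nums multipliers _ hpre
  exact pvFinal nums multipliers hpre
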